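-- pv_equiv track=rewrite | github.com/minhee231/X-BestJPG-Collection | Script/Scraping.py | setImageUrl
-- ===== SOURCE A (Python) =====
-- def setImageUrl(image_src):
--     if 'media' in image_src:
--         url_parts = image_src.split('&')
--
--         for i, part in enumerate(url_parts):
--             if part.startswith('name='):
--                 url_parts[i] = 'name=large'
--         return '&'.join(url_parts)
--
--     else: return
-- ===== SOURCE B (Python) =====
-- def setImageUrl(image_src):
--     # Single left-to-right scan: rewrite a 'name=...' value to 'name=large' when it
--     # begins an '&'-segment, without splitting/joining. (None when 'media' absent, as in A.)
--     if 'media' in image_src: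
--         out = []
--         n = len(image_src)
--         i = 0
--         at_start = True
--         while i < n:
--             if at_start and image_src.startswith('name=', i):
--                 out.append('name=large')
--                 i += 5
--                 while i < n and image_src[i] != '&':
--                     i += 1
--                 at_start = False
--             else:
--                 c = image_src[i]
--                 out.append(c)
--                 at_start = (c == '&')
--                 i += 1
--         return ''.join(out)
--     else:
--         return
-- ===== Notes on version B (the rewrite author's own statement) =====
-- stated objective: alternative
-- what changed: B replaces A's split('&')/enumerate-index-rewrite/join pipeline with a single left-to-right character scan that emits 'name=large' when an '&'-segment starts with 'name=' and skips that segment's value, building the output in one pass without intermediate lists.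
import Mathlib
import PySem

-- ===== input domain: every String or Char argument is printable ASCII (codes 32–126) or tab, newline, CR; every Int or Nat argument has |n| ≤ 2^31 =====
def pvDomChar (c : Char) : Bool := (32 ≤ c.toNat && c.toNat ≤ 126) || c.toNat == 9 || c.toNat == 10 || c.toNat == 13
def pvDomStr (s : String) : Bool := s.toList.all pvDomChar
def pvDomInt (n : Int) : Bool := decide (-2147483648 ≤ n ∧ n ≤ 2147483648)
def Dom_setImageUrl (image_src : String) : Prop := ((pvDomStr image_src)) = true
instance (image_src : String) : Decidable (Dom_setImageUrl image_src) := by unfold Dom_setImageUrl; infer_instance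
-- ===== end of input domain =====

-- B replaces A's split('&') / index loop / join pipeline by a single left-to-right character
-- scan that rewrites 'name=...' to 'name=large' at segment starts in one pass (objective: alternative).

-- ===== PORT A =====
def setImageUrl (image_src : String) : Option String :=
  if PySem.Chars.isIn "media".toList image_src.toList then
    let url_parts := PySem.Chars.splitOn image_src.toList "&".toList
    let url_parts2 := (PySem.List.enumerate url_parts 0).foldl
      (fun acc p =>
        if PySem.Chars.startswith p.2 "name=".toList then
          PySem.List.pySetD acc p.1 "name=large".toList
        else acc) url_parts
    some (String.ofList (PySem.Chars.join "&".toList url_parts2))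
  else none

-- ===== PORT B =====
-- the inner while loops of Source B: 'at_start' is the flag, the index walk is the structural recursion
def scanName : Bool → List Char → List Char
  | _, [] => []
  | atStart, c :: t =>
    if atStart && PySem.Chars.startswith (c :: t) "name=".toList then
      "name=large".toList ++ scanName false ((t.drop 4).dropWhile (fun d => d ≠ '&'))
    else
      c :: scanName (c == '&') t
termination_by _ cs => cs.length
decreasing_by
  · simp only [List.length_cons]
    have h1 := List.length_dropWhile_le (fun d => d ≠ '&') (t.drop 4)
    have h2 : (t.drop 4).length = t.length - 4 := List.length_drop
    omega
  · simp

def setImageUrl_alt (image_src : String) : Option String :=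
  if PySem.Chars.isIn "media".toList image_src.toList then
    some (String.ofList (scanName true image_src.toList))
  else none

-- ===== PRECONDITION & SPEC =====
def Spec_setImageUrl (image_src : String) (out : Option String) : Prop := out = setImageUrl_alt image_src
instance (image_src : String) (out : Option String) : Decidable (Spec_setImageUrl image_src out) := by unfold Spec_setImageUrl; infer_instance

-- ===== CLAIM (what is proved, stated in full; the proofs are below) =====
def Claim_equal_setImageUrl : Prop := ∀ (image_src : String), Dom_setImageUrl image_src → Spec_setImageUrl image_src (setImageUrl image_src)

-- ===== LEMMAS AND PROOFS =====

-- proof-only reformulation of split('&') as structural recursion (cur holds the current segment reversed)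
def splitChar (cur : List Char) : List Char → List (List Char)
  | [] => [cur.reverse]
  | c :: t => if c = '&' then cur.reverse :: splitChar [] t else splitChar (c :: cur) t

-- the body of A's index loop, as the segment transformer it performs
def repl (seg : List Char) : List Char :=
  if PySem.Chars.startswith seg "name=".toList then "name=large".toList else seg

lemma name_toList : "name=".toList = ['n', 'a', 'm', 'e', '='] := by decide

lemma go_spec : ∀ (fuel : Nat) (l cur : List Char) (acc : List (List Char)), l.length < fuel →
    PySem.Chars.splitOn.go ['&'] fuel l cur acc = acc.reverse ++ splitChar cur l := by
  intro fuel
  induction fuel with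
  | zero => intro l cur acc h; omega
  | succ n ih =>
    intro l cur acc h
    cases l with
    | nil => rw [PySem.Chars.splitOn.go.eq_def]; simp [splitChar]
    | cons c rest =>
      rw [PySem.Chars.splitOn.go.eq_def]
      by_cases hc : c = '&'
      · subst hc
        simp only [List.isPrefixOf, beq_self_eq_true, Bool.true_and, if_true]
        simp only [List.length_cons, List.length_nil, List.drop_succ_cons, List.drop_zero]
        rw [ih rest [] (cur.reverse :: acc) (by simp at h ⊢; omega)]
        simp [splitChar]
      · have hpre : List.isPrefixOf ['&'] (c :: rest) = false := by
          simp only [List.isPrefixOf, Bool.and_true, beq_eq_false_iff_ne, ne_eq]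
          exact fun hh => hc hh.symm
        simp only [hpre, Bool.false_eq_true, if_false]
        rw [ih rest (c :: cur) acc (by simp at h ⊢; omega)]
        simp [splitChar, hc]

lemma splitOn_eq_splitChar (l : List Char) :
    PySem.Chars.splitOn l ['&'] = splitChar [] l := by
  rw [PySem.Chars.splitOn, go_spec (l.length + 1) l [] [] (by omega)]
  rfl

lemma foldl_set_go (xs : List (List Char)) : ∀ (done : List (List Char)),
    (PySem.List.enumerate xs (done.length : Int)).foldl
      (fun acc p =>
        if PySem.Chars.startswith p.2 "name=".toList then
          PySem.List.pySetD acc p.1 "name=large".toList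
        else acc) (done ++ xs) = done ++ xs.map repl := by
  induction xs with
  | nil => intro done; simp [PySem.List.enumerate_nil]
  | cons x xs ih =>
    intro done
    rw [PySem.List.enumerate_cons, List.foldl_cons]
    dsimp only
    have hstep :
        (if PySem.Chars.startswith x "name=".toList then
          PySem.List.pySetD (done ++ x :: xs) ((done.length : Int)) "name=large".toList
        else done ++ x :: xs) = done ++ repl x :: xs := by
      rw [repl]
      split
      · rw [PySem.List.pySetD_natCast, List.set_append]
        simp
      · rfl
    rw [hstep]
    have harr : done ++ repl x :: xs = (done ++ [repl x]) ++ xs := by simp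
    have hlen : ((done.length : Int)) + 1 = (((done ++ [repl x]).length : Int)) := by
      simp
    rw [harr, hlen, ih (done ++ [repl x])]
    simp

lemma foldl_set_eq_map (xs : List (List Char)) :
    (PySem.List.enumerate xs 0).foldl
      (fun acc p =>
        if PySem.Chars.startswith p.2 "name=".toList then
          PySem.List.pySetD acc p.1 "name=large".toList
        else acc) xs = xs.map repl := by
  have h := foldl_set_go xs []
  simpa using h

lemma scan_copy (seg : List Char) : ∀ (r : List Char), '&' ∉ seg →
    scanName false (seg ++ r) = seg ++ scanName false r := by
  induction seg with
  | nil => intro r _; rfl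
  | cons c t ih =>
    intro r h
    have hc : (c == '&') = false := by
      simp only [beq_eq_false_iff_ne, ne_eq]
      exact fun hh => h (hh ▸ List.mem_cons_self)
    rw [List.cons_append, scanName]
    simp only [Bool.false_and, Bool.false_eq_true, if_false, hc]
    rw [ih r (fun hh => h (List.mem_cons_of_mem _ hh))]
    simp

lemma scan_nil (b : Bool) : scanName b [] = [] := by rw [scanName]

lemma scan_false_amp (rest : List Char) :
    scanName false ('&' :: rest) = '&' :: scanName true rest := by
  rw [scanName]; simp

lemma startswith_name_decomp (seg : List Char)
    (h : PySem.Chars.startswith seg "name=".toList = true) :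
    ∃ seg', seg = 'n' :: 'a' :: 'm' :: 'e' :: '=' :: seg' := by
  rw [PySem.Chars.startswith_iff, name_toList] at h
  obtain ⟨t, ht⟩ := h
  exact ⟨t, ht ▸ rfl⟩

lemma scan_match (seg' tail : List Char) (h : '&' ∉ seg') :
    scanName true ('n' :: 'a' :: 'm' :: 'e' :: '=' :: (seg' ++ tail)) =
      "name=large".toList ++ scanName false (tail.dropWhile (fun d => d ≠ '&')) := by
  have hsw : PySem.Chars.startswith
      ('n' :: 'a' :: 'm' :: 'e' :: '=' :: (seg' ++ tail)) "name=".toList = true := by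
    rw [PySem.Chars.startswith_iff, name_toList]
    exact ⟨seg' ++ tail, rfl⟩
  rw [scanName]
  simp only [hsw, Bool.true_and, if_true, List.drop_succ_cons, List.drop_zero]
  have hnil : seg'.dropWhile (fun d => decide (d ≠ '&')) = [] := by
    rw [List.dropWhile_eq_nil_iff]
    intro x hx
    simp only [decide_eq_true_eq, ne_eq]
    exact fun e => h (e ▸ hx)
  rw [List.dropWhile_append, hnil]
  simp

lemma scan_last (seg : List Char) (h : '&' ∉ seg) :
    scanName true seg = repl seg := by
  by_cases hsw : PySem.Chars.startswith seg "name=".toList = true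
  · obtain ⟨seg', rfl⟩ := startswith_name_decomp seg hsw
    have h' : '&' ∉ seg' := fun hh => h (by simp [hh])
    have := scan_match seg' [] h'
    simp only [List.append_nil, List.dropWhile_nil] at this
    rw [this, repl, if_pos hsw, scan_nil]
    simp
  · have hsw' : PySem.Chars.startswith seg "name=".toList = false :=
      Bool.eq_false_iff.mpr hsw
    cases seg with
    | nil => rw [repl, if_neg hsw]; exact scan_nil true
    | cons c t =>
      rw [scanName]
      simp only [hsw', Bool.and_false, Bool.false_eq_true, if_false]
      have hc : (c == '&') = false := by
        simp only [beq_eq_false_iff_ne, ne_eq]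
        exact fun hh => h (hh ▸ List.mem_cons_self)
      rw [hc]
      have ht : '&' ∉ t := fun hh => h (List.mem_cons_of_mem _ hh)
      have := scan_copy t [] ht
      simp only [List.append_nil] at this
      rw [this]
      rw [repl, if_neg hsw]
      simp [scan_nil]

lemma scan_step (seg rest : List Char) (h : '&' ∉ seg) :
    scanName true (seg ++ '&' :: rest) = repl seg ++ '&' :: scanName true rest := by
  by_cases hsw : PySem.Chars.startswith seg "name=".toList = true
  · obtain ⟨seg', rfl⟩ := startswith_name_decomp seg hsw
    have h' : '&' ∉ seg' := fun hh => h (by simp [hh])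
    have harr : ('n' :: 'a' :: 'm' :: 'e' :: '=' :: seg') ++ '&' :: rest =
        'n' :: 'a' :: 'm' :: 'e' :: '=' :: (seg' ++ '&' :: rest) := by simp
    rw [harr, scan_match seg' ('&' :: rest) h']
    have hdw : ('&' :: rest).dropWhile (fun d => decide (d ≠ '&')) = '&' :: rest := by
      simp
    rw [hdw, scan_false_amp, repl, if_pos hsw]
  · have hsw' : PySem.Chars.startswith seg "name=".toList = false :=
      Bool.eq_false_iff.mpr hsw
    cases seg with
    | nil =>
      have hsw2 : PySem.Chars.startswith ('&' :: rest) "name=".toList = false := by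
        simp [PySem.Chars.startswith, name_toList, List.isPrefixOf]
      rw [List.nil_append, scanName]
      simp only [hsw2, Bool.and_false, Bool.false_eq_true, if_false]
      rw [repl, if_neg hsw]
      simp
    | cons c t =>
      rw [List.cons_append, scanName]
      have hsw2 : PySem.Chars.startswith (c :: (t ++ '&' :: rest)) "name=".toList = false := by
        rw [Bool.eq_false_iff]
        intro hpre
        rw [PySem.Chars.startswith_iff, name_toList] at hpre
        have hseg : (c :: t) <+: (c :: (t ++ '&' :: rest)) := ⟨'&' :: rest, by simp⟩
        by_cases hlen : (['n', 'a', 'm', 'e', '='] : List Char).length ≤ (c :: t).length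
        · have hp2 : (['n', 'a', 'm', 'e', '='] : List Char) <+: (c :: t) :=
            List.prefix_of_prefix_length_le hpre hseg hlen
          refine hsw ?_
          rw [PySem.Chars.startswith_iff, name_toList]
          exact hp2
        · obtain ⟨z, hz⟩ := hpre
          have hlt : (c :: t).length < (['n', 'a', 'm', 'e', '='] : List Char).length :=
            Nat.lt_of_not_le hlen
          have e1 : (['n', 'a', 'm', 'e', '='] : List Char) ++ z = (c :: t) ++ '&' :: rest := by
            rw [hz]; simp
          have hidx : ((['n', 'a', 'm', 'e', '='] : List Char) ++ z)[(c :: t).length]'(by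
              simp at hlt ⊢; omega) = '&' := by
            rw [List.getElem_of_eq e1, List.getElem_append_right (by simp)]
            simp
          rw [List.getElem_append_left hlt] at hidx
          have hamp : '&' ∈ (['n', 'a', 'm', 'e', '='] : List Char) :=
            hidx ▸ List.getElem_mem _
          simp at hamp
      simp only [hsw2, Bool.and_false, Bool.false_eq_true, if_false]
      have hc : (c == '&') = false := by
        simp only [beq_eq_false_iff_ne, ne_eq]
        exact fun hh => h (hh ▸ List.mem_cons_self)
      rw [hc]
      have ht : '&' ∉ t := fun hh => h (List.mem_cons_of_mem _ hh)
      rw [scan_copy t ('&' :: rest) ht, scan_false_amp, repl, if_neg hsw]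
      rfl

lemma splitChar_ne_nil (l : List Char) : ∀ (cur : List Char), splitChar cur l ≠ [] := by
  induction l with
  | nil => intro cur; simp [splitChar]
  | cons c t ih =>
    intro cur
    rw [splitChar]
    split
    · simp
    · exact ih (c :: cur)

lemma splitChar_append (seg rest : List Char) : ∀ (cur : List Char), '&' ∉ seg →
    splitChar cur (seg ++ '&' :: rest) = (cur.reverse ++ seg) :: splitChar [] rest := by
  induction seg with
  | nil => intro cur _; simp [splitChar]
  | cons c t ih =>
    intro cur h
    have hc : c ≠ '&' := fun hh => h (hh ▸ List.mem_cons_self)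
    rw [List.cons_append, splitChar]
    simp only [hc, if_false]
    rw [ih (c :: cur) (fun hh => h (List.mem_cons_of_mem _ hh))]
    simp

lemma splitChar_no_amp (seg : List Char) : ∀ (cur : List Char), '&' ∉ seg →
    splitChar cur seg = [cur.reverse ++ seg] := by
  induction seg with
  | nil => intro cur _; simp [splitChar]
  | cons c t ih =>
    intro cur h
    have hc : c ≠ '&' := fun hh => h (hh ▸ List.mem_cons_self)
    rw [splitChar]
    simp only [hc, if_false]
    rw [ih (c :: cur) (fun hh => h (List.mem_cons_of_mem _ hh))]
    simp

lemma split_first (l : List Char) (hm : '&' ∈ l) :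
    ∃ seg rest, '&' ∉ seg ∧ l = seg ++ '&' :: rest := by
  induction l with
  | nil => cases hm
  | cons c t ih =>
    by_cases hc : c = '&'
    · exact ⟨[], t, by simp, by rw [hc]; rfl⟩
    · have hmt : '&' ∈ t := by
        rcases List.mem_cons.mp hm with h1 | h1
        · exact absurd h1.symm hc
        · exact h1
      obtain ⟨seg, rest, hseg, heq⟩ := ih hmt
      refine ⟨c :: seg, rest, ?_, by rw [heq, List.cons_append]⟩
      simp only [List.mem_cons, not_or]
      exact ⟨fun hh => hc hh.symm, hseg⟩

lemma join_map_splitChar (l : List Char) :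
    PySem.Chars.join ['&'] ((splitChar [] l).map repl) = scanName true l := by
  have H : ∀ (n : Nat) (l : List Char), l.length ≤ n →
      PySem.Chars.join ['&'] ((splitChar [] l).map repl) = scanName true l := by
    intro n
    induction n with
    | zero =>
      intro l hl
      have : l = [] := List.eq_nil_of_length_eq_zero (Nat.le_zero.mp hl)
      subst this
      rw [scan_nil]
      decide
    | succ n ih =>
      intro l hl
      by_cases hm : '&' ∈ l
      · obtain ⟨seg, rest, hseg, rfl⟩ := split_first l hm
        rw [splitChar_append seg rest [] hseg]
        simp only [List.reverse_nil, List.nil_append, List.map_cons]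
        cases hsp : (splitChar [] rest).map repl with
        | nil => exact absurd (List.map_eq_nil_iff.mp hsp) (splitChar_ne_nil rest [])
        | cons q qs =>
          rw [PySem.Chars.join_cons_cons]
          rw [← hsp]
          have hrest : rest.length ≤ n := by
            have := hl
            simp only [List.length_append, List.length_cons] at this
            omega
          rw [ih rest hrest, scan_step seg rest hseg]
          simp
      · rw [splitChar_no_amp l [] hm]
        simp only [List.reverse_nil, List.nil_append, List.map_cons, List.map_nil,
          PySem.Chars.join_singleton]
        exact (scan_last l hm).symm
  exact H l.length l le_rfl

-- ===== VERDICT (by name: the statement is the Claim_ definition above) =====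
theorem setImageUrl_spec : Claim_equal_setImageUrl := by
  intro s _
  unfold Spec_setImageUrl setImageUrl setImageUrl_alt
  rw [show ("&".toList) = ['&'] from by decide]
  simp only [splitOn_eq_splitChar, foldl_set_eq_map, join_map_splitChar]
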